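-- pv_equiv track=rewrite | github.com/Pratimathulung/python-tutorial | python-for-everybody/assignments/sum_odd_fibonacci.py | find_odd_fib_sum
-- ===== SOURCE A (Python) =====
-- def find_odd_fib_sum(min, max):
--     sum = 0
--     f1, f2 = 0, 1
--     while f2 < max:
--         if f2 >= min and f2 % 2 != 0:
--             sum += f2
--         f1, f2 = f2, f1 + f2
--     return sum
-- ===== SOURCE B (Python) =====
-- def find_odd_fib_sum(min, max):
--     # Every third Fibonacci number is even (pattern odd, odd, even), so walk
--     # the sequence over the odd PAIRS, three indices per iteration, with no
--     # parity test at all.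
--     total = 0
--     a, b = 1, 1
--     while a < max:
--         if a >= min:
--             total += a
--         if b < max and b >= min:
--             total += b
--         e = a + b
--         a, b = b + e, b + 2 * e
--     return total
-- ===== Notes on version B (the rewrite author's own statement) =====
-- stated objective: alternative
-- what changed: Instead of testing every Fibonacci number for oddness, B exploits the odd-odd-even period of Fibonacci parity: it iterates over the consecutive odd pairs (a,b), adds the in-range members of each pair, and jumps three sequence positions per iteration with no modulus operation.
import Mathlib
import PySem

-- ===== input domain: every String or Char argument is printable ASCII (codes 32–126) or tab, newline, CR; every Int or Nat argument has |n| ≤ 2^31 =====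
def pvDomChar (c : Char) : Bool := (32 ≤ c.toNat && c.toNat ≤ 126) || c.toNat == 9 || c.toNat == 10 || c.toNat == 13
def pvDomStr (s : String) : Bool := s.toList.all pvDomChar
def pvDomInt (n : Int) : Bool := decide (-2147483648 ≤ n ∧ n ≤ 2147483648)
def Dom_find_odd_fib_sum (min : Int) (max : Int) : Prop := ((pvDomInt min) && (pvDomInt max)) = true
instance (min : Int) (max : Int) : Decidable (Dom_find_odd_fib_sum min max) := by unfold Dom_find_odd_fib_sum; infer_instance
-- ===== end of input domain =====

-- B replaces A's per-element parity test by the odd-odd-even structure of the Fibonacci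
-- sequence: it strides three indices per iteration over the odd pairs, never computing a
-- remainder; same behaviour, an alternative algorithm of similar cost.

-- ===== PORT A =====
-- A's while-loop, carrying the running sum; the invariant hypotheses (0 ≤ f1, 1 ≤ f2, f1 ≤ f2)
-- hold at the entry call (0,1), are preserved, and justify termination.
def pvLoopA (mn mx s f1 f2 : Int) (h1 : 0 ≤ f1) (h2 : 1 ≤ f2) (_h3 : f1 ≤ f2) : Int :=
  if h : f2 < mx then
    pvLoopA mn mx (if mn ≤ f2 ∧ f2 % 2 ≠ 0 then s + f2 else s) f2 (f1 + f2)
      (by omega) (by omega) (by omega)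
  else s
termination_by (2 * mx - f1 - f2).toNat
decreasing_by omega

def find_odd_fib_sum (min : Int) (max : Int) : Int :=
  pvLoopA min max 0 0 1 (by omega) (by omega) (by omega)

-- ===== PORT B =====
-- B's while-loop over the consecutive odd Fibonacci pair (a, b); each iteration adds the
-- in-range members of the pair and skips the following even number e = a + b, advancing to
-- the next odd pair (b + e, b + 2*e).  The hypotheses are loop invariants (established at
-- the entry call (1,1) and preserved) used only for termination and the proofs.
def pvLoopB (mn mx s a b : Int) (h1 : 1 ≤ a) (h2 : a ≤ b) (h3 : b ≤ 2 * a)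
    (ha : a % 2 = 1) (hb : b % 2 = 1) : Int :=
  if h : a < mx then
    pvLoopB mn mx
      (if b < mx ∧ mn ≤ b then (if mn ≤ a then s + a else s) + b else (if mn ≤ a then s + a else s))
      (b + (a + b)) (b + 2 * (a + b))
      (by omega) (by omega) (by omega) (by omega) (by omega)
  else s
termination_by (mx - a).toNat
decreasing_by omega

def find_odd_fib_sum_alt (min : Int) (max : Int) : Int :=
  pvLoopB min max 0 1 1 (by omega) (by omega) (by omega) (by omega) (by omega)

-- ===== PRECONDITION & SPEC =====
def Spec_find_odd_fib_sum (min : Int) (max : Int) (out : Int) : Prop := out = find_odd_fib_sum_alt min max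
instance (min : Int) (max : Int) (out : Int) : Decidable (Spec_find_odd_fib_sum min max out) := by unfold Spec_find_odd_fib_sum; infer_instance

-- ===== CLAIM (what is proved, stated in full; the proofs are below) =====
def Claim_equal_find_odd_fib_sum : Prop := ∀ (min : Int) (max : Int), Dom_find_odd_fib_sum min max → Spec_find_odd_fib_sum min max (find_odd_fib_sum min max)

-- ===== LEMMAS AND PROOFS =====

-- pvLoopA only depends on the values of its state, not on the invariant proofs.
theorem pvLoopA_congr (mn mx s f1 f2 f1' f2' : Int) (e1 : f1 = f1') (e2 : f2 = f2')
    {p1 p2 p3 p1' p2' p3'} :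
    pvLoopA mn mx s f1 f2 p1 p2 p3 = pvLoopA mn mx s f1' f2' p1' p2' p3' := by
  subst e1; subst e2; rfl

-- One iteration of B's loop corresponds to (up to) three iterations of A's loop:
-- A's state (f1, f2) = (b - a, a) walks through f2 = a (odd), f2 = b (odd), f2 = a + b
-- (even, contributes nothing), reaching the next odd pair.
theorem pvLoopB_eq_pvLoopA (mn mx s a b : Int) (h1 : 1 ≤ a) (h2 : a ≤ b) (h3 : b ≤ 2 * a)
    (ha : a % 2 = 1) (hb : b % 2 = 1) :
    pvLoopB mn mx s a b h1 h2 h3 ha hb =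
      pvLoopA mn mx s (b - a) a (by omega) (by omega) (by omega) := by
  fun_induction pvLoopB mn mx s a b h1 h2 h3 ha hb with
  | case1 s a b h1 h2 h3 ha hb h ih =>
    -- normalise the IH's A-side state
    rw [pvLoopA_congr mn mx _ _ _ (a + b) (a + 2 * b) (by ring) (by ring)] at ih
    simp only [dite_eq_ite] at ih
    rw [ih]; symm
    -- A, step 1: f2 = a < mx, a is odd
    rw [pvLoopA, dif_pos h]
    have hca : (mn ≤ a ∧ a % 2 ≠ 0) ↔ mn ≤ a := by omega
    rw [if_congr hca rfl rfl,
        pvLoopA_congr mn mx _ _ _ a b rfl (by ring)]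
    by_cases hbmx : b < mx
    · -- A, step 2: f2 = b < mx, b is odd
      rw [pvLoopA, dif_pos hbmx]
      have hcb : (mn ≤ b ∧ b % 2 ≠ 0) ↔ mn ≤ b := by omega
      rw [if_congr hcb rfl rfl]
      have hs : (if mn ≤ b then (if mn ≤ a then s + a else s) + b else if mn ≤ a then s + a else s)
          = (if b < mx ∧ mn ≤ b then (if mn ≤ a then s + a else s) + b else if mn ≤ a then s + a else s) := by
        simp [hbmx]
      rw [hs, pvLoopA_congr mn mx _ _ _ b (a + b) rfl (by ring)]
      -- A, step 3: f2 = a + b is even, so nothing is added whether or not it is < mx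
      by_cases habmx : a + b < mx
      · rw [pvLoopA, dif_pos habmx]
        have hce : ¬ (mn ≤ a + b ∧ (a + b) % 2 ≠ 0) := by omega
        rw [if_neg hce, pvLoopA_congr mn mx _ _ _ (a + b) (a + 2 * b) rfl (by ring)]
      · rw [pvLoopA, dif_neg habmx, pvLoopA, dif_neg (by omega)]
      all_goals omega
    · -- A, step 2: f2 = b ≥ mx, A stops with s1; B's second conditional adds nothing,
      -- and the next pvLoopA state has f2 = a + 2*b ≥ mx as well.
      rw [pvLoopA, dif_neg hbmx, pvLoopA, dif_neg (by omega)]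
      simp [hbmx]
    all_goals omega
  | case2 s a b h1 h2 h3 ha hb h =>
    rw [pvLoopA, dif_neg h]

-- ===== VERDICT (by name: the statement is the Claim_ definition above) =====
theorem find_odd_fib_sum_spec : Claim_equal_find_odd_fib_sum := by
  intro mn mx _
  unfold Spec_find_odd_fib_sum find_odd_fib_sum find_odd_fib_sum_alt
  rw [pvLoopB_eq_pvLoopA]
  exact (pvLoopA_congr mn mx 0 0 1 (1 - 1) 1 (by norm_num) rfl).symm
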